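-- pv_equiv track=rewrite | github.com/BoarQing/migraphx_study | migraphx_infer/log_to_table.py | parse_perf
-- ===== SOURCE A (Python) =====
-- data_str = [
--     "Session creation time cost:",
--     "First inference time cost:",
--     "Total inference time cost:",
--     "Average inference time cost:",
--     "Number of inferences per second:",
--     "Avg CPU usage:",
--     "Peak working set size:",
--     "Min Latency:",
--     "Max Latency:",
--     "P50 Latency:",
--     "P90 Latency:",
--     "P95 Latency:",
--     "P99 Latency:",
--     "P999 Latency:",
-- ]
--
-- def parse_perf(lines):
--     ret = [""] * len(data_str)
--     for line in lines:
--         for i in range(len(data_str)):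
--             data_type = data_str[i]
--             if data_type in line:
--                 res = line.split(data_type)[1].strip()
--                 ret[i] = res
--     return ret
-- ===== SOURCE B (Python) =====
-- data_str = [
--     "Session creation time cost:",
--     "First inference time cost:",
--     "Total inference time cost:",
--     "Average inference time cost:",
--     "Number of inferences per second:",
--     "Avg CPU usage:",
--     "Peak working set size:",
--     "Min Latency:",
--     "Max Latency:",
--     "P50 Latency:",
--     "P90 Latency:",
--     "P95 Latency:",
--     "P99 Latency:",
--     "P999 Latency:",
-- ]
--
-- def _last_value(lines, pat):
--     # first match scanning from the end == last match scanning forward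
--     for line in reversed(lines):
--         if pat in line:
--             return line.split(pat)[1].strip()
--     return ""
--
-- def parse_perf(lines):
--     return [_last_value(lines, pat) for pat in data_str]
-- ===== Notes on version B (the rewrite author's own statement) =====
-- stated objective: simpler
-- what changed: A scans lines forward and keeps overwriting each ret[i] on every match; B inverts the loops: for each pattern it scans reversed(lines) and returns at the first match (= the last match of the forward scan), keeping no mutable result list.
import Mathlib
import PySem

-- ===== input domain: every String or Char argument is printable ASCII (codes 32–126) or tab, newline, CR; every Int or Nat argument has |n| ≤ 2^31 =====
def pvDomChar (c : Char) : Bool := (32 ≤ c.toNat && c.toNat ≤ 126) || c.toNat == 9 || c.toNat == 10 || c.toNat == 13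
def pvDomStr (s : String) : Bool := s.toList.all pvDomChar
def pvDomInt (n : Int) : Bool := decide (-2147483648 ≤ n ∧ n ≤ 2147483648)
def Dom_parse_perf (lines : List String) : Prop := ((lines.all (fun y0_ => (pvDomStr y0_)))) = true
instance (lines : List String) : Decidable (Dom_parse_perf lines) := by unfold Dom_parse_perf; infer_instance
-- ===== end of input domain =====

-- B replaces A's forward per-line loop that keeps overwriting ret[i] by a per-pattern
-- scan of reversed(lines) that returns at the first match (objective: simpler).

-- the module-level constant data_str
def data_str : List String := [
  "Session creation time cost:",
  "First inference time cost:",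
  "Total inference time cost:",
  "Average inference time cost:",
  "Number of inferences per second:",
  "Avg CPU usage:",
  "Peak working set size:",
  "Min Latency:",
  "Max Latency:",
  "P50 Latency:",
  "P90 Latency:",
  "P95 Latency:",
  "P99 Latency:"
  , "P999 Latency:"]

-- line.split(data_type)[1].strip() — the expression shared verbatim by both Pythons.
-- Every data_str entry is nonempty so split? is some, and it is only evaluated when
-- data_type ∈ line, so index 1 exists: the getD defaults are never taken.
def pvExtract (line data_type : String) : String :=
  PySem.Str.strip ((PySem.List.pyGet? ((PySem.Str.split? line data_type).getD []) 1).getD "")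

-- ===== PORT A =====
-- for i in range(len(data_str)) — len is a Nat, so List.range is exact here
def parse_perf (lines : List String) : List String :=
  lines.foldl (fun ret line =>
    (List.range data_str.length).foldl (fun ret i =>
      let data_type := data_str.getD i ""
      if PySem.Str.isIn data_type line then
        ret.set i (pvExtract line data_type)
      else ret) ret)
    (List.replicate data_str.length "")

-- ===== PORT B =====
def lastValueAux (pat : String) : List String → String
  | [] => ""
  | line :: rest =>
      if PySem.Str.isIn pat line then pvExtract line pat
      else lastValueAux pat rest

def parse_perf_alt (lines : List String) : List String :=
  data_str.map (fun pat => lastValueAux pat lines.reverse)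

-- ===== PRECONDITION & SPEC =====
def Spec_parse_perf (lines : List String) (out : List String) : Prop := out = parse_perf_alt lines
instance (lines : List String) (out : List String) : Decidable (Spec_parse_perf lines out) := by unfold Spec_parse_perf; infer_instance

-- ===== CLAIM (what is proved, stated in full; the proofs are below) =====
def Claim_equal_parse_perf : Prop := ∀ (lines : List String), Dom_parse_perf lines → Spec_parse_perf lines (parse_perf lines)

-- ===== LEMMAS AND PROOFS =====

-- generic: length is preserved by the inner indexed fold
theorem fold_set_len (p : Nat → Bool) (v : Nat → String) (n : Nat) (r : List String) :
    ((List.range n).foldl (fun r i => if p i then r.set i (v i) else r) r).length = r.length := by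
  induction n generalizing r with
  | zero => simp
  | succ n ih =>
      rw [List.range_succ, List.foldl_append]
      simp only [List.foldl_cons, List.foldl_nil]
      split <;> simp [ih]

-- generic: the inner indexed fold acts pointwise on the list
theorem fold_set_getD (p : Nat → Bool) (v : Nat → String) :
    ∀ (n : Nat) (r : List String) (j : Nat),
    ((List.range n).foldl (fun r i => if p i then r.set i (v i) else r) r).getD j "" =
      if j < n ∧ p j = true then (if j < r.length then v j else "") else r.getD j "" := by
  intro n
  induction n with
  | zero => intro r j; simp
  | succ n ih =>
      intro r j
      rw [List.range_succ, List.foldl_append]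
      simp only [List.foldl_cons, List.foldl_nil]
      by_cases hp : p n = true
      · rw [if_pos hp]
        by_cases hj : j = n
        · subst hj
          by_cases hr : j < r.length
          · have hr' : j < ((List.range j).foldl (fun r i => if p i then r.set i (v i) else r) r).length := by
              rw [fold_set_len]; exact hr
            rw [List.getD_eq_getElem?_getD, List.getElem?_set_self hr']
            simp [hp, hr]
          · rw [List.getD_eq_getElem?_getD, List.getElem?_set_self' ]
            rw [List.getElem?_eq_none (by rw [fold_set_len]; omega)]
            simp [hp, hr]
        · rw [List.getD_eq_getElem?_getD, List.getElem?_set_ne (by omega), ← List.getD_eq_getElem?_getD, ih]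
          have hiff : (j < n + 1 ∧ p j = true) ↔ (j < n ∧ p j = true) := by
            constructor <;> rintro ⟨h1, h2⟩ <;> exact ⟨by omega, h2⟩
          rw [if_congr hiff rfl rfl]
      · rw [if_neg hp, ih]
        have hiff : (j < n + 1 ∧ p j = true) ↔ (j < n ∧ p j = true) := by
          constructor <;> rintro ⟨h1, h2⟩
          · refine ⟨?_, h2⟩
            rcases Nat.lt_succ_iff_lt_or_eq.mp h1 with h | h
            · exact h
            · subst h; exact absurd h2 hp
          · exact ⟨by omega, h2⟩
        rw [if_congr hiff rfl rfl]

-- the per-pattern forward fold equals first-match-on-reverse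
theorem foldl_step_eq_find (pat : String) :
    ∀ (xs : List String) (init : String),
    xs.foldl (fun acc line => if PySem.Str.isIn pat line then pvExtract line pat else acc) init =
      (match xs.reverse.find? (fun line => PySem.Str.isIn pat line) with
       | some l => pvExtract l pat
       | none => init) := by
  intro xs
  induction xs with
  | nil => intro init; simp
  | cons l ls ih =>
      intro init
      rw [List.foldl_cons, ih, List.reverse_cons, List.find?_append]
      cases h : ls.reverse.find? (fun line => PySem.Str.isIn pat line) with
      | some x => simp
      | none =>
          simp only [Option.none_or]
          by_cases hp : PySem.Str.isIn pat l = true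
          · rw [List.find?_cons_of_pos hp, if_pos hp]
          · rw [List.find?_cons_of_neg (by simpa using hp), if_neg hp, List.find?_nil]

theorem lastValueAux_eq_find (pat : String) (xs : List String) :
    lastValueAux pat xs =
      (match xs.find? (fun line => PySem.Str.isIn pat line) with
       | some l => pvExtract l pat
       | none => "") := by
  induction xs with
  | nil => simp [lastValueAux]
  | cons l ls ih =>
      by_cases hp : PySem.Str.isIn pat l = true
      · rw [List.find?_cons_of_pos hp]
        simp only [lastValueAux, if_pos hp]
      · rw [List.find?_cons_of_neg (by simpa using hp)]
        simp only [lastValueAux, if_neg hp]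
        exact ih

-- main invariant: A's nested fold is the per-index forward fold
theorem parse_perf_fold (lines : List String) :
    ∀ (ret : List String), ret.length = data_str.length →
    lines.foldl (fun ret line =>
      (List.range data_str.length).foldl (fun r i =>
        if PySem.Str.isIn (data_str.getD i "") line then r.set i (pvExtract line (data_str.getD i "")) else r) ret) ret =
    (List.range data_str.length).map (fun i =>
      lines.foldl (fun acc line =>
        if PySem.Str.isIn (data_str.getD i "") line then pvExtract line (data_str.getD i "") else acc)
        (ret.getD i "")) := by
  induction lines with
  | nil =>
      intro ret hret
      simp only [List.foldl_nil]
      apply List.ext_getElem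
      · simp [hret]
      · intro j h1 h2
        simp only [List.getElem_map, List.getElem_range]
        rw [List.getD_eq_getElem?_getD, List.getElem?_eq_getElem (by simp at h2 ⊢; omega)]
        rfl
  | cons line lines ih =>
      intro ret hret
      rw [List.foldl_cons, ih _ (by rw [fold_set_len]; exact hret)]
      apply List.map_congr_left
      intro i hi
      simp only [List.mem_range] at hi
      rw [List.foldl_cons]
      congr 1
      rw [fold_set_getD]
      have hir : i < ret.length := by rw [hret]; exact hi
      by_cases hp : PySem.Str.isIn (data_str.getD i "") line = true
      · rw [if_pos ⟨hi, hp⟩, if_pos hp, if_pos hir]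
      · rw [if_neg (by intro h; exact hp h.2), if_neg hp]

-- ===== VERDICT (by name: the statement is the Claim_ definition above) =====
theorem parse_perf_spec : Claim_equal_parse_perf := by
  intro lines _
  unfold Spec_parse_perf
  -- parse_perf lines is definitionally the fold in parse_perf_fold (the let is zeta-reduced)
  have h : parse_perf lines =
      (List.range data_str.length).map (fun i =>
        lines.foldl (fun acc line =>
          if PySem.Str.isIn (data_str.getD i "") line then pvExtract line (data_str.getD i "") else acc)
          ((List.replicate data_str.length "").getD i "")) :=
    parse_perf_fold lines (List.replicate data_str.length "") (by simp)
  rw [h]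
  unfold parse_perf_alt
  apply List.ext_getElem
  · simp
  · intro j h1 h2
    have hj : j < data_str.length := by simpa using h2
    simp only [List.getElem_map, List.getElem_range]
    rw [foldl_step_eq_find, lastValueAux_eq_find]
    have hd : data_str.getD j "" = data_str[j] := by
      rw [List.getD_eq_getElem?_getD, List.getElem?_eq_getElem hj]; rfl
    rw [hd]
    cases lines.reverse.find? (fun line => PySem.Str.isIn data_str[j] line) with
    | some x => rfl
    | none => simp [List.getD_eq_getElem?_getD, hj]
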